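-- pv_equiv track=rewrite | github.com/BloomGameStudio/BloomDiscordBot | controllers/data_manager.py | next_item
-- ===== SOURCE A (Python) =====
-- def next_item(dic, key):
--     nxt = False
--     for k, v in dic.items():
--         if k == key: #found the key
--             nxt = True #so the next is what we want
--         elif nxt == True:
--             return v #return it
--     return None
-- ===== SOURCE B (Python) =====
-- def next_item(dic, key):
--     keys = list(dic)
--     vals = list(dic.values())
--     for k, nxt in zip(keys, vals[1:]):
--         if k == key:
--             return nxt
--     return None
-- ===== Notes on version B (the rewrite author's own statement) =====
-- stated objective: idiomatic
-- what changed: Replaces the boolean-flag scan (set on the key, checked on every later iteration) by pairing the key list with the value list shifted by one and returning the partner of the first matching key.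
import Mathlib
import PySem

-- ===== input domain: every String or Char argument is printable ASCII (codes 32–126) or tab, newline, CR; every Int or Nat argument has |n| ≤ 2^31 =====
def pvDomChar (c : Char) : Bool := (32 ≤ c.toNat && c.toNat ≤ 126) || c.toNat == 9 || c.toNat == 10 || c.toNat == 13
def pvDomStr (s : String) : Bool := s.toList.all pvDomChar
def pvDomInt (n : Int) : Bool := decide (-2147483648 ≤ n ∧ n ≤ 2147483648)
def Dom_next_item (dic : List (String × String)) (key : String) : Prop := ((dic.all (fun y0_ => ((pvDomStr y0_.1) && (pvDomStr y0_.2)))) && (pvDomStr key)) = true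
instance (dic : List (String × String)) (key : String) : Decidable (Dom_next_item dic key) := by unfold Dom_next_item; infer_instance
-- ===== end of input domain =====

-- B pairs the key list with the value list shifted by one instead of A's boolean-flag scan; idiomatic, same cost; equal on duplicate-free key lists (the inputs representing a Python dict).


-- ===== PORT A =====
-- A's loop over dic.items() with the boolean flag `nxt`; early `return v` when the flag is set.
def nextItemLoop (dic : List (String × String)) (key : String) (nxt : Bool) : Option String :=
  match dic with
  | [] => none
  | (k, v) :: rest =>
    if k = key then nextItemLoop rest key true
    else if nxt = true then some v
    else nextItemLoop rest key nxt

def next_item (dic : List (String × String)) (key : String) : Option String :=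
  nextItemLoop dic key false

-- ===== PORT B =====
-- B: zip the keys with the values dropped by one; first pair whose key matches gives the answer.
def next_item_alt (dic : List (String × String)) (key : String) : Option String :=
  (((dic.map Prod.fst).zip ((dic.map Prod.snd).drop 1)).find? (fun p => p.1 == key)).map Prod.snd

-- ===== PRECONDITION & SPEC =====
-- Pre_ excludes association lists with duplicate keys: A's parameter is a Python dict, in which
-- duplicate keys cannot occur, so such lists represent no Python input at all.
def Pre_next_item (dic : List (String × String)) (key : String) : Prop :=
  (dic.map Prod.fst).Nodup
instance (dic : List (String × String)) (key : String) : Decidable (Pre_next_item dic key) := by unfold Pre_next_item; infer_instance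
def pvWitness_next_item : (List (String × String)) × String := ([("a", "1"), ("b", "2")], "a")

def Spec_next_item (dic : List (String × String)) (key : String) (out : Option String) : Prop := out = next_item_alt dic key
instance (dic : List (String × String)) (key : String) (out : Option String) : Decidable (Spec_next_item dic key out) := by unfold Spec_next_item; infer_instance

-- ===== CLAIM (what is proved, stated in full; the proofs are below) =====
def Claim_equal_next_item : Prop := ∀ (dic : List (String × String)) (key : String), Dom_next_item dic key → Pre_next_item dic key → Spec_next_item dic key (next_item dic key)

-- ===== LEMMAS AND PROOFS =====

-- When the flag is set and the key occurs no more, A returns the value of the next entry.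
theorem nextItemLoop_true (dic : List (String × String)) (key : String)
    (h : key ∉ dic.map Prod.fst) :
    nextItemLoop dic key true = (dic.head?).map Prod.snd := by
  cases dic with
  | nil => rfl
  | cons p rest =>
    obtain ⟨k, v⟩ := p
    simp only [List.map_cons, List.mem_cons] at h
    rw [not_or] at h
    simp [nextItemLoop, Ne.symm h.1]

theorem next_item_alt_cons (k v : String) (rest : List (String × String)) (key : String) :
    next_item_alt ((k, v) :: rest) key =
      if k = key then (rest.head?).map Prod.snd else next_item_alt rest key := by
  cases rest with
  | nil => simp [next_item_alt]
  | cons q rest2 =>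
    obtain ⟨k2, v2⟩ := q
    by_cases hk : k = key <;>
      simp [next_item_alt, hk]

theorem nextItemLoop_eq_alt (dic : List (String × String)) (key : String)
    (h : (dic.map Prod.fst).Nodup) :
    nextItemLoop dic key false = next_item_alt dic key := by
  induction dic with
  | nil => rfl
  | cons p rest ih =>
    obtain ⟨k, v⟩ := p
    simp only [List.map_cons, List.nodup_cons] at h
    rw [next_item_alt_cons]
    by_cases hk : k = key
    · subst hk
      simp only [nextItemLoop, if_pos rfl, ite_true]
      exact nextItemLoop_true rest k h.1
    · simp only [nextItemLoop, if_neg hk]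
      exact ih h.2

-- ===== VERDICT (by name: the statement is the Claim_ definition above) =====
theorem next_item_spec : Claim_equal_next_item := by
  intro dic key _ hpre
  exact nextItemLoop_eq_alt dic key hpre
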